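-- pv_equiv track=rewrite | github.com/amanmalhotrainit/Bowler-Biomechanics-Analyzer- | files/utils/visualizer.py | _landmark_risks
-- ===== SOURCE A (Python) =====
-- ZONE_LANDMARKS = {
--     "back_risk":     [11, 12, 23, 24],
--     "elbow_risk":    [13, 14, 15, 16],
--     "knee_risk":     [25, 26, 27, 28],
--     "shoulder_risk": [11, 12],
--     "trunk_risk":    [11, 12, 23, 24, 0],
-- }
--
-- def _landmark_risks(risks):
--     lm_risk = ["LOW"] * 33
--     for zone, lm_ids in ZONE_LANDMARKS.items():
--         zone_risk = risks.get(zone, "LOW")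
--         for idx in lm_ids:
--             current = lm_risk[idx]
--             if zone_risk == "HIGH" or (zone_risk == "MEDIUM" and current == "LOW"):
--                 lm_risk[idx] = zone_risk
--     return lm_risk
-- ===== SOURCE B (Python) =====
-- ZONE_LANDMARKS = {
--     "back_risk":     [11, 12, 23, 24],
--     "elbow_risk":    [13, 14, 15, 16],
--     "knee_risk":     [25, 26, 27, 28],
--     "shoulder_risk": [11, 12],
--     "trunk_risk":    [11, 12, 23, 24, 0],
-- }
--
-- # Inverse index: landmark index -> zones that cover it (built once).
-- _COVER = {}
-- for _zone, _ids in ZONE_LANDMARKS.items():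
--     for _i in _ids:
--         _COVER.setdefault(_i, []).append(_zone)
--
-- def _landmark_risks(risks):
--     out = []
--     for i in range(33):
--         vals = [risks.get(z, "LOW") for z in _COVER.get(i, [])]
--         if "HIGH" in vals:
--             out.append("HIGH")
--         elif "MEDIUM" in vals:
--             out.append("MEDIUM")
--         else:
--             out.append("LOW")
--     return out
-- ===== Notes on version B (the rewrite author's own statement) =====
-- stated objective: alternative
-- what changed: B inverts the traversal: instead of A's per-zone pass that mutates a 33-slot buffer with an upgrade rule, B precomputes an inverse index (landmark -> covering zones) and builds the output in one comprehension per landmark, taking HIGH if any covering zone is HIGH, else MEDIUM if any is MEDIUM, else LOW.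
import Mathlib
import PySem

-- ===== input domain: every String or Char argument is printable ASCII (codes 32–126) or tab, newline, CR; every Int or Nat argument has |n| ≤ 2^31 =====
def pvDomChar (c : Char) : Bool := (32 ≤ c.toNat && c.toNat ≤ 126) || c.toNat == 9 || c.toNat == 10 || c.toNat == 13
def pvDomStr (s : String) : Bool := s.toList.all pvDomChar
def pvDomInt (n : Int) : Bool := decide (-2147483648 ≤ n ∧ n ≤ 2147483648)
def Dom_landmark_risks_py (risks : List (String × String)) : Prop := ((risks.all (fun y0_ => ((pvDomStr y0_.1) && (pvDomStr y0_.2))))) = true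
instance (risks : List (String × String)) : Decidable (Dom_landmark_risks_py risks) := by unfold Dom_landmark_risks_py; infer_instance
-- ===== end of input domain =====

-- B inverts the traversal (per-landmark read of an inverse zone index instead of per-zone buffer mutation); objective: alternative structure, same cost.


-- ===== PORT A =====
-- ZONE_LANDMARKS as an ordered list of (zone, landmark-id) pairs, in dict insertion order.
def pvZoneLandmarks : List (String × List Int) :=
  [("back_risk",     [11, 12, 23, 24]),
   ("elbow_risk",    [13, 14, 15, 16]),
   ("knee_risk",     [25, 26, 27, 28]),
   ("shoulder_risk", [11, 12]),
   ("trunk_risk",    [11, 12, 23, 24, 0])]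

def landmark_risks_py (risks : List (String × String)) : List String :=
  pvZoneLandmarks.foldl
    (fun lm_risk zl =>
      let zone_risk := PySem.Dict.getD (PySem.Dict.mk risks) zl.1 "LOW"
      zl.2.foldl
        (fun lm idx =>
          let current := PySem.List.pyGetD lm idx ""
          if zone_risk = "HIGH" ∨ (zone_risk = "MEDIUM" ∧ current = "LOW") then
            PySem.List.pySetD lm idx zone_risk
          else lm)
        lm_risk)
    (List.replicate 33 "LOW")

-- ===== PORT B =====
-- _COVER: inverse index landmark -> zones covering it, built once from ZONE_LANDMARKS.
def pvCover : PySem.Dict Int (List String) :=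
  pvZoneLandmarks.foldl
    (fun d zl => zl.2.foldl (fun d i => d.insert i (d.getD i [] ++ [zl.1])) d)
    PySem.Dict.empty

def landmark_risks_py_alt (risks : List (String × String)) : List String :=
  (PySem.List.pyRange 0 33 1).map
    (fun i =>
      let vals := (pvCover.getD i []).map (fun z => PySem.Dict.getD (PySem.Dict.mk risks) z "LOW")
      if "HIGH" ∈ vals then "HIGH"
      else if "MEDIUM" ∈ vals then "MEDIUM"
      else "LOW")

-- ===== PRECONDITION & SPEC =====
def Spec_landmark_risks_py (risks : List (String × String)) (out : List String) : Prop := out = landmark_risks_py_alt risks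
instance (risks : List (String × String)) (out : List String) : Decidable (Spec_landmark_risks_py risks out) := by unfold Spec_landmark_risks_py; infer_instance

-- ===== CLAIM (what is proved, stated in full; the proofs are below) =====
def Claim_equal_landmark_risks_py : Prop := ∀ (risks : List (String × String)), Dom_landmark_risks_py risks → Spec_landmark_risks_py risks (landmark_risks_py risks)

-- ===== LEMMAS AND PROOFS =====
theorem cover_lit : pvCover = PySem.Dict.mk
    [(11, ["back_risk","shoulder_risk","trunk_risk"]),
     (12, ["back_risk","shoulder_risk","trunk_risk"]),
     (23, ["back_risk","trunk_risk"]),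
     (24, ["back_risk","trunk_risk"]),
     (13, ["elbow_risk"]), (14, ["elbow_risk"]), (15, ["elbow_risk"]), (16, ["elbow_risk"]),
     (25, ["knee_risk"]), (26, ["knee_risk"]), (27, ["knee_risk"]), (28, ["knee_risk"]),
     (0, ["trunk_risk"])] := by decide

-- B's port, with the range, the inverse index and the inner map evaluated away.
set_option maxHeartbeats 2000000 in
theorem altform (risks : List (String × String)) :
    landmark_risks_py_alt risks =
      (let L := fun z => PySem.Dict.getD (PySem.Dict.mk risks) z "LOW"
       let cc := fun (vals : List String) =>
         if "HIGH" ∈ vals then "HIGH" else if "MEDIUM" ∈ vals then "MEDIUM" else "LOW"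
       let b := L "back_risk"; let e := L "elbow_risk"; let k := L "knee_risk";
       let s := L "shoulder_risk"; let t := L "trunk_risk"
       [cc [t], "LOW","LOW","LOW","LOW","LOW","LOW","LOW","LOW","LOW","LOW",
        cc [b,s,t], cc [b,s,t], cc [e], cc [e], cc [e], cc [e],
        "LOW","LOW","LOW","LOW","LOW","LOW",
        cc [b,t], cc [b,t], cc [k], cc [k], cc [k], cc [k],
        "LOW","LOW","LOW","LOW"]) := by
  have hr : PySem.List.pyRange 0 33 1 =
    [0,1,2,3,4,5,6,7,8,9,10,11,12,13,14,15,16,17,18,19,20,21,22,23,24,25,26,27,28,29,30,31,32] := by decide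
  simp only [landmark_risks_py_alt, hr, cover_lit, List.map_cons, List.map_nil]
  norm_num [PySem.Dict.getD, PySem.Dict.get?, PySem.Dict.get?_mk_cons]

-- one write of A's inner loop, with the `if` pushed from the list level to the element level
theorem step_eq (zr : String) (lm : List String) (i : Int) (h1 : 0 ≤ i) :
    (if zr = "HIGH" ∨ (zr = "MEDIUM" ∧ PySem.List.pyGetD lm i "" = "LOW") then PySem.List.pySetD lm i zr else lm)
    = lm.set i.toNat (if zr = "HIGH" ∨ (zr = "MEDIUM" ∧ lm.getD i.toNat "" = "LOW") then zr else lm.getD i.toNat "") := by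
  have hg : PySem.List.pyGetD lm i "" = lm.getD i.toNat "" := by
    simp only [PySem.List.pyGetD, PySem.List.pyGet?, PySem.List.pyIdx?, h1, List.getD]
    by_cases hlt : i < (lm.length : Int)
    · simp [hlt, h1]
    · have h2 : lm.length ≤ i.toNat := by omega
      simp [hlt, h1]
  rw [hg]
  by_cases h : zr = "HIGH" ∨ (zr = "MEDIUM" ∧ lm.getD i.toNat "" = "LOW")
  · rw [if_pos h, if_pos h, PySem.List.pySetD_of_nonneg lm zr h1]
  · rw [if_neg h, if_neg h]
    apply List.ext_getElem?
    intro m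
    by_cases hm : m = i.toNat
    · rw [hm]
      by_cases hlen : i.toNat < lm.length
      · simp [hlen, List.getD]
      · simp [hlen]
    · simp [Ne.symm hm]

theorem tri (v : String) :
    v = "HIGH" ∨ v = "MEDIUM" ∨ (v ≠ "HIGH" ∧ v ≠ "MEDIUM" ∧ "HIGH" ≠ v ∧ "MEDIUM" ≠ v) := by
  by_cases h1 : v = "HIGH"
  · exact Or.inl h1
  · by_cases h2 : v = "MEDIUM"
    · exact Or.inr (Or.inl h2)
    · exact Or.inr (Or.inr ⟨h1, h2, fun h => h1 h.symm, fun h => h2 h.symm⟩)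

-- per-landmark component lemmas: A's chain of conditional writes = B's class of the covering zones
theorem lemA (v : String) :
    (if v = "HIGH" ∨ v = "MEDIUM" then v else "LOW")
      = (if "HIGH" ∈ [v] then "HIGH" else if "MEDIUM" ∈ [v] then "MEDIUM" else "LOW") := by
  rcases tri v with rfl|rfl|⟨h1,h2,h3,h4⟩ <;> simp_all

theorem lemC2 (b t : String) :
    (if t = "HIGH" ∨ (t = "MEDIUM" ∧ (b = "HIGH" ∨ b = "MEDIUM" → b = "LOW")) then t
     else if b = "HIGH" ∨ b = "MEDIUM" then b else "LOW")
      = (if "HIGH" ∈ [b, t] then "HIGH" else if "MEDIUM" ∈ [b, t] then "MEDIUM" else "LOW") := by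
  rcases tri b with rfl|rfl|⟨hb1,hb2,hb3,hb4⟩ <;>
    rcases tri t with rfl|rfl|⟨ht1,ht2,ht3,ht4⟩ <;> simp_all

theorem lemC3 (b s t : String) :
    (if t = "HIGH" ∨ (t = "MEDIUM" ∧
         (if s = "HIGH" ∨ (s = "MEDIUM" ∧ (b = "HIGH" ∨ b = "MEDIUM" → b = "LOW")) then s
          else if b = "HIGH" ∨ b = "MEDIUM" then b else "LOW") = "LOW") then t
     else if s = "HIGH" ∨ (s = "MEDIUM" ∧ (b = "HIGH" ∨ b = "MEDIUM" → b = "LOW")) then s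
          else if b = "HIGH" ∨ b = "MEDIUM" then b else "LOW")
      = (if "HIGH" ∈ [b, s, t] then "HIGH" else if "MEDIUM" ∈ [b, s, t] then "MEDIUM" else "LOW") := by
  rcases tri b with rfl|rfl|⟨hb1,hb2,hb3,hb4⟩ <;>
    rcases tri s with rfl|rfl|⟨hs1,hs2,hs3,hs4⟩ <;>
      rcases tri t with rfl|rfl|⟨ht1,ht2,ht3,ht4⟩ <;> simp_all

theorem if_cons (c : Prop) [Decidable c] (a b : String) (r : List String) :
    (if c then a :: r else b :: r) = (if c then a else b) :: r := by
  split_ifs <;> rfl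

-- the whole equality, over the five looked-up zone risks as free variables
theorem key5 (b e k s t : String) :
    (if t = "HIGH" ∨ t = "MEDIUM" then
      (t :: ["LOW", "LOW", "LOW", "LOW", "LOW", "LOW", "LOW", "LOW", "LOW", "LOW",
        (if t = "HIGH" ∨ (t = "MEDIUM" ∧
             (if s = "HIGH" ∨ (s = "MEDIUM" ∧ (b = "HIGH" ∨ b = "MEDIUM" → b = "LOW")) then s
              else if b = "HIGH" ∨ b = "MEDIUM" then b else "LOW") = "LOW") then t
         else if s = "HIGH" ∨ (s = "MEDIUM" ∧ (b = "HIGH" ∨ b = "MEDIUM" → b = "LOW")) then s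
              else if b = "HIGH" ∨ b = "MEDIUM" then b else "LOW"),
        (if t = "HIGH" ∨ (t = "MEDIUM" ∧
             (if s = "HIGH" ∨ (s = "MEDIUM" ∧ (b = "HIGH" ∨ b = "MEDIUM" → b = "LOW")) then s
              else if b = "HIGH" ∨ b = "MEDIUM" then b else "LOW") = "LOW") then t
         else if s = "HIGH" ∨ (s = "MEDIUM" ∧ (b = "HIGH" ∨ b = "MEDIUM" → b = "LOW")) then s
              else if b = "HIGH" ∨ b = "MEDIUM" then b else "LOW"),
        (if e = "HIGH" ∨ e = "MEDIUM" then e else "LOW"),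
        (if e = "HIGH" ∨ e = "MEDIUM" then e else "LOW"),
        (if e = "HIGH" ∨ e = "MEDIUM" then e else "LOW"),
        (if e = "HIGH" ∨ e = "MEDIUM" then e else "LOW"),
        "LOW", "LOW", "LOW", "LOW", "LOW", "LOW",
        (if t = "HIGH" ∨ (t = "MEDIUM" ∧ (b = "HIGH" ∨ b = "MEDIUM" → b = "LOW")) then t
         else if b = "HIGH" ∨ b = "MEDIUM" then b else "LOW"),
        (if t = "HIGH" ∨ (t = "MEDIUM" ∧ (b = "HIGH" ∨ b = "MEDIUM" → b = "LOW")) then t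
         else if b = "HIGH" ∨ b = "MEDIUM" then b else "LOW"),
        (if k = "HIGH" ∨ k = "MEDIUM" then k else "LOW"),
        (if k = "HIGH" ∨ k = "MEDIUM" then k else "LOW"),
        (if k = "HIGH" ∨ k = "MEDIUM" then k else "LOW"),
        (if k = "HIGH" ∨ k = "MEDIUM" then k else "LOW"),
        "LOW", "LOW", "LOW", "LOW"])
     else
      ("LOW" :: ["LOW", "LOW", "LOW", "LOW", "LOW", "LOW", "LOW", "LOW", "LOW", "LOW",
        (if t = "HIGH" ∨ (t = "MEDIUM" ∧
             (if s = "HIGH" ∨ (s = "MEDIUM" ∧ (b = "HIGH" ∨ b = "MEDIUM" → b = "LOW")) then s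
              else if b = "HIGH" ∨ b = "MEDIUM" then b else "LOW") = "LOW") then t
         else if s = "HIGH" ∨ (s = "MEDIUM" ∧ (b = "HIGH" ∨ b = "MEDIUM" → b = "LOW")) then s
              else if b = "HIGH" ∨ b = "MEDIUM" then b else "LOW"),
        (if t = "HIGH" ∨ (t = "MEDIUM" ∧
             (if s = "HIGH" ∨ (s = "MEDIUM" ∧ (b = "HIGH" ∨ b = "MEDIUM" → b = "LOW")) then s
              else if b = "HIGH" ∨ b = "MEDIUM" then b else "LOW") = "LOW") then t
         else if s = "HIGH" ∨ (s = "MEDIUM" ∧ (b = "HIGH" ∨ b = "MEDIUM" → b = "LOW")) then s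
              else if b = "HIGH" ∨ b = "MEDIUM" then b else "LOW"),
        (if e = "HIGH" ∨ e = "MEDIUM" then e else "LOW"),
        (if e = "HIGH" ∨ e = "MEDIUM" then e else "LOW"),
        (if e = "HIGH" ∨ e = "MEDIUM" then e else "LOW"),
        (if e = "HIGH" ∨ e = "MEDIUM" then e else "LOW"),
        "LOW", "LOW", "LOW", "LOW", "LOW", "LOW",
        (if t = "HIGH" ∨ (t = "MEDIUM" ∧ (b = "HIGH" ∨ b = "MEDIUM" → b = "LOW")) then t
         else if b = "HIGH" ∨ b = "MEDIUM" then b else "LOW"),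
        (if t = "HIGH" ∨ (t = "MEDIUM" ∧ (b = "HIGH" ∨ b = "MEDIUM" → b = "LOW")) then t
         else if b = "HIGH" ∨ b = "MEDIUM" then b else "LOW"),
        (if k = "HIGH" ∨ k = "MEDIUM" then k else "LOW"),
        (if k = "HIGH" ∨ k = "MEDIUM" then k else "LOW"),
        (if k = "HIGH" ∨ k = "MEDIUM" then k else "LOW"),
        (if k = "HIGH" ∨ k = "MEDIUM" then k else "LOW"),
        "LOW", "LOW", "LOW", "LOW"]))
    = [(if "HIGH" ∈ [t] then "HIGH" else if "MEDIUM" ∈ [t] then "MEDIUM" else "LOW"),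
       "LOW","LOW","LOW","LOW","LOW","LOW","LOW","LOW","LOW","LOW",
       (if "HIGH" ∈ [b,s,t] then "HIGH" else if "MEDIUM" ∈ [b,s,t] then "MEDIUM" else "LOW"),
       (if "HIGH" ∈ [b,s,t] then "HIGH" else if "MEDIUM" ∈ [b,s,t] then "MEDIUM" else "LOW"),
       (if "HIGH" ∈ [e] then "HIGH" else if "MEDIUM" ∈ [e] then "MEDIUM" else "LOW"),
       (if "HIGH" ∈ [e] then "HIGH" else if "MEDIUM" ∈ [e] then "MEDIUM" else "LOW"),
       (if "HIGH" ∈ [e] then "HIGH" else if "MEDIUM" ∈ [e] then "MEDIUM" else "LOW"),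
       (if "HIGH" ∈ [e] then "HIGH" else if "MEDIUM" ∈ [e] then "MEDIUM" else "LOW"),
       "LOW","LOW","LOW","LOW","LOW","LOW",
       (if "HIGH" ∈ [b,t] then "HIGH" else if "MEDIUM" ∈ [b,t] then "MEDIUM" else "LOW"),
       (if "HIGH" ∈ [b,t] then "HIGH" else if "MEDIUM" ∈ [b,t] then "MEDIUM" else "LOW"),
       (if "HIGH" ∈ [k] then "HIGH" else if "MEDIUM" ∈ [k] then "MEDIUM" else "LOW"),
       (if "HIGH" ∈ [k] then "HIGH" else if "MEDIUM" ∈ [k] then "MEDIUM" else "LOW"),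
       (if "HIGH" ∈ [k] then "HIGH" else if "MEDIUM" ∈ [k] then "MEDIUM" else "LOW"),
       (if "HIGH" ∈ [k] then "HIGH" else if "MEDIUM" ∈ [k] then "MEDIUM" else "LOW"),
       "LOW","LOW","LOW","LOW"] := by
  rw [if_cons]
  simp only [List.cons.injEq]
  exact ⟨lemA t, trivial, trivial, trivial, trivial, trivial, trivial, trivial, trivial,
    trivial, trivial, lemC3 b s t, lemC3 b s t, lemA e, lemA e, lemA e, lemA e,
    trivial, trivial, trivial, trivial, trivial, trivial, lemC2 b t, lemC2 b t,
    lemA k, lemA k, lemA k, lemA k, trivial⟩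

-- ===== VERDICT (by name: the statement is the Claim_ definition above) =====
set_option maxHeartbeats 2000000 in
set_option maxRecDepth 4096 in
theorem landmark_risks_py_spec : Claim_equal_landmark_risks_py := by
  intro risks _
  unfold Spec_landmark_risks_py
  simp [landmark_risks_py, pvZoneLandmarks, step_eq, List.getD, List.replicate, Int.reduceToNat,
    List.set_cons_zero, List.set_cons_succ]
  simp only [PySem.List.pySetD, PySem.List.pySet?, PySem.List.pyIdx?]
  norm_num
  rw [altform]
  exact key5 (PySem.Dict.getD (PySem.Dict.mk risks) "back_risk" "LOW")
    (PySem.Dict.getD (PySem.Dict.mk risks) "elbow_risk" "LOW")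
    (PySem.Dict.getD (PySem.Dict.mk risks) "knee_risk" "LOW")
    (PySem.Dict.getD (PySem.Dict.mk risks) "shoulder_risk" "LOW")
    (PySem.Dict.getD (PySem.Dict.mk risks) "trunk_risk" "LOW")
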